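-- pv_equiv track=rewrite | github.com/windigerbus/unshackle | unshackle/core/tracks/subtitle.py | sanitize_broken_webvtt
-- ===== SOURCE A (Python) =====
-- def sanitize_broken_webvtt(text: str) -> str:
--     """
--     Remove or fix corrupted WebVTT lines, particularly those with invalid timestamps.
--
--     Parameters:
--         text: The WebVTT content as string
--
--     Returns:
--         Sanitized WebVTT content with corrupted lines removed
--     """
--     lines = text.splitlines()
--     sanitized_lines = []
--
--     i = 0
--     while i < len(lines):
--         # Skip empty lines
--         if not lines[i].strip():
--             sanitized_lines.append(lines[i])
--             i += 1
--             continue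
--
--         # Check for timestamp lines
--         if "-->" in lines[i]:
--             # Validate timestamp format
--             timestamp_parts = lines[i].split("-->")
--             if len(timestamp_parts) != 2 or not timestamp_parts[1].strip() or timestamp_parts[1].strip() == "0":
--                 # Skip this timestamp and its content until next timestamp or end
--                 j = i + 1
--                 while j < len(lines) and "-->" not in lines[j] and lines[j].strip():
--                     j += 1
--                 i = j
--                 continue
--
--             # Add valid timestamp line
--             sanitized_lines.append(lines[i])
--         else:
--             # Add non-timestamp line
--             sanitized_lines.append(lines[i])
--
--         i += 1
--
--     return "\n".join(sanitized_lines)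
-- ===== SOURCE B (Python) =====
-- def sanitize_broken_webvtt(text: str) -> str:
--     """Single flat pass with a `skipping` flag instead of an index with a nested skip-ahead loop."""
--     out = []
--     skipping = False
--     for line in text.splitlines():
--         if not line.strip():
--             out.append(line)
--             skipping = False
--         elif "-->" in line:
--             parts = line.split("-->")
--             if len(parts) != 2 or not parts[1].strip() or parts[1].strip() == "0":
--                 skipping = True
--             else:
--                 skipping = False
--                 out.append(line)
--         elif not skipping:
--             out.append(line)
--     return "\n".join(out)
-- ===== Notes on version B (the rewrite author's own statement) =====
-- stated objective: simpler
-- what changed: Replaced the index-based while loop with a nested skip-ahead inner while by a single flat pass over the lines carrying a boolean skipping flag.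
import Mathlib
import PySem

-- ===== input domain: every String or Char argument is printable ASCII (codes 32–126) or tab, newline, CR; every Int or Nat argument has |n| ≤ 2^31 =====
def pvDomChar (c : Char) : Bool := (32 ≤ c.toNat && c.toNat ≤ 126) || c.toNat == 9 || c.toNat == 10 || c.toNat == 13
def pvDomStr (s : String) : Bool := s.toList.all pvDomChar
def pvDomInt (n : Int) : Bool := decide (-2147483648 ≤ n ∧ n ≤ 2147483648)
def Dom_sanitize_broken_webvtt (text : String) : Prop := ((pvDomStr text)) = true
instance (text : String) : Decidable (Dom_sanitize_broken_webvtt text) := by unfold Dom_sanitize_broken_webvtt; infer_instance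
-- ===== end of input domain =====

-- B replaces A's index loop with nested skip-ahead while by one flat pass with a boolean `skipping` flag (simpler decomposition).

-- ===== PORT A =====

-- the invalid-timestamp test, shared verbatim by the two Python sources
def pvBadStamp (l : String) : Bool :=
  let parts := (PySem.Str.split? l "-->").getD []
  parts.length ≠ 2 || PySem.Str.strip (parts.getD 1 "") == "" || PySem.Str.strip (parts.getD 1 "") == "0"

-- condition of A's inner while: "-->" not in lines[j] and lines[j].strip()
def pvSkipCond (l : String) : Bool := !(PySem.Str.isIn "-->" l) && !(PySem.Str.strip l == "")

-- A's outer while loop; the inner while that advances j is the dropWhile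
def pvALoop : List String → List String → List String
  | [], acc => acc
  | l :: rest, acc =>
    if PySem.Str.strip l == "" then pvALoop rest (acc ++ [l])
    else if PySem.Str.isIn "-->" l then
      if pvBadStamp l then pvALoop (rest.dropWhile pvSkipCond) acc
      else pvALoop rest (acc ++ [l])
    else pvALoop rest (acc ++ [l])
  termination_by lines _ => lines.length
  decreasing_by
    · simp
    · simpa using Nat.lt_succ_of_le (List.length_dropWhile_le pvSkipCond rest)
    · simp
    · simp

def sanitize_broken_webvtt (text : String) : String :=
  PySem.Str.join "\n" (pvALoop (PySem.Str.splitlines text) [])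

-- ===== PORT B =====

-- B's single pass: one step per line over the state (out, skipping)
def pvBStep (st : List String × Bool) (l : String) : List String × Bool :=
  if PySem.Str.strip l == "" then (st.1 ++ [l], false)
  else if PySem.Str.isIn "-->" l then
    if pvBadStamp l then (st.1, true) else (st.1 ++ [l], false)
  else if st.2 then st else (st.1 ++ [l], st.2)

def sanitize_broken_webvtt_alt (text : String) : String :=
  PySem.Str.join "\n" ((PySem.Str.splitlines text).foldl pvBStep ([], false)).1

-- ===== PRECONDITION & SPEC =====
def Spec_sanitize_broken_webvtt (text : String) (out : String) : Prop := out = sanitize_broken_webvtt_alt text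
instance (text : String) (out : String) : Decidable (Spec_sanitize_broken_webvtt text out) := by unfold Spec_sanitize_broken_webvtt; infer_instance

-- ===== CLAIM (what is proved, stated in full; the proofs are below) =====
def Claim_equal_sanitize_broken_webvtt : Prop := ∀ (text : String), Dom_sanitize_broken_webvtt text → Spec_sanitize_broken_webvtt text (sanitize_broken_webvtt text)

-- ===== LEMMAS AND PROOFS =====

-- A's loop (index form) and B's fold (flag form) build the same line list, for both flag values:
-- the skipping=true run corresponds to A's inner while, i.e. a dropWhile of the remaining lines.
theorem pvLoop_eq (lines : List String) : ∀ acc : List String,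
    pvALoop lines acc = (lines.foldl pvBStep (acc, false)).1
    ∧ pvALoop (lines.dropWhile pvSkipCond) acc = (lines.foldl pvBStep (acc, true)).1 := by
  induction lines with
  | nil => intro acc; simp [pvALoop]
  | cons l rest ih =>
    intro acc
    by_cases hb : PySem.Str.strip l == ""
    · have hp : ¬ pvSkipCond l = true := by simp [pvSkipCond, hb]
      constructor
      · rw [pvALoop]; simp [hb, pvBStep, (ih (acc ++ [l])).1]
      · rw [List.dropWhile_cons_of_neg hp, pvALoop]
        simp [hb, pvBStep, (ih (acc ++ [l])).1]
    · by_cases hi : PySem.Str.isIn "-->" l = true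
      · have hi' := hi; simp at hi'
        have hp : ¬ pvSkipCond l = true := by simp [pvSkipCond, hi']
        by_cases hv : pvBadStamp l = true
        · constructor
          · rw [pvALoop]; simp [hb, hi', hv, pvBStep, (ih acc).2]
          · rw [List.dropWhile_cons_of_neg hp, pvALoop]
            simp [hb, hi', hv, pvBStep, (ih acc).2]
        · constructor
          · rw [pvALoop]; simp [hb, hi', hv, pvBStep, (ih (acc ++ [l])).1]
          · rw [List.dropWhile_cons_of_neg hp, pvALoop]
            simp [hb, hi', hv, pvBStep, (ih (acc ++ [l])).1]
      · have hi' := hi; simp at hi'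
        have hp : pvSkipCond l = true := by simp [pvSkipCond, hb, hi']
        constructor
        · rw [pvALoop]; simp [hb, hi', pvBStep, (ih (acc ++ [l])).1]
        · rw [List.dropWhile_cons_of_pos hp]
          simpa [pvBStep, hb, hi'] using (ih acc).2

-- ===== VERDICT (by name: the statement is the Claim_ definition above) =====
theorem sanitize_broken_webvtt_spec : Claim_equal_sanitize_broken_webvtt := by
  intro text _
  unfold Spec_sanitize_broken_webvtt sanitize_broken_webvtt sanitize_broken_webvtt_alt
  rw [(pvLoop_eq (PySem.Str.splitlines text) []).1]
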